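-- pv_equiv track=rewrite | github.com/sssutton10/Advent-of-Code | 2023/Code/Code Day 14.py | tilt_row
-- ===== SOURCE A (Python) =====
-- def tilt_row(r):
--     new_row = r
--     next_open = 0 if new_row[0] == '.' else 1
--     for i in range(1, len(new_row)):
--         if new_row[i] == '.':
--             continue
--         elif new_row[i] == 'O':
--             new_row[i] = '.'
--             new_row[next_open] = 'O'
--             next_open += 1
--         else:
--             next_open = i + 1
--     return new_row
-- ===== SOURCE B (Python) =====
-- def tilt_row(r):
--     out = []
--     seg = []
--     for c in r:
--         if c == '.' or c == 'O':
--             seg.append(c)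
--         else:
--             k = seg.count('O')
--             out += ['O'] * k + ['.'] * (len(seg) - k) + [c]
--             seg = []
--     k = seg.count('O')
--     out += ['O'] * k + ['.'] * (len(seg) - k)
--     r[:] = out
--     return r
-- ===== Notes on version B (the rewrite author's own statement) =====
-- stated objective: alternative
-- what changed: A walks the row with a next_open write pointer, swapping each 'O' backward in place; B partitions the row into wall-separated segments, rebuilds each as count('O') 'O's followed by '.'s, and writes the result back with r[:] = out.
-- outside the precondition, e.g. on tilt_row([]): A raises IndexError, B returns []
import Mathlib
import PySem

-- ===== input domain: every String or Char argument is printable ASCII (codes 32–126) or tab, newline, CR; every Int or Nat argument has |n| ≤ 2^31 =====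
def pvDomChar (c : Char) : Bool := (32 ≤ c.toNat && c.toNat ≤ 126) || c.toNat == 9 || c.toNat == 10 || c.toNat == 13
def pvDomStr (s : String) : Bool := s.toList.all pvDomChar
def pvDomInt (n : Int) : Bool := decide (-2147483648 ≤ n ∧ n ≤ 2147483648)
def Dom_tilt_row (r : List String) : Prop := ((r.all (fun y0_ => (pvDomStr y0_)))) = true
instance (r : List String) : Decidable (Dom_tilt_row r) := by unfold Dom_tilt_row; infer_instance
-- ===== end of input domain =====

-- B rebuilds the row segment-by-segment (count the 'O's between walls, emit them then the '.'s)
-- instead of A's in-place next_open write-pointer walk; same O(n) cost, different decomposition.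
-- Both A and B mutate the Python argument in place (B via r[:] = out); the equivalence proved
-- here is about the return value.

-- ===== PORT A =====
-- one iteration of A's for-loop: i is the current index, state = (new_row, next_open)
def tiltStep (st : List String × Int) (i : Int) : List String × Int :=
  if (PySem.List.pyGet? st.1 i).getD "" = "." then st
  else if (PySem.List.pyGet? st.1 i).getD "" = "O" then
    ((st.1.set i.toNat ".").set st.2.toNat "O", st.2 + 1)
  else (st.1, i + 1)

def tilt_row (r : List String) : List String :=
  match r with
  | [] => []   -- Python raises IndexError here (reads new_row[0]); excluded by Pre_tilt_row
  | c0 :: _ =>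
    let no0 : Int := if c0 = "." then 0 else 1
    ((PySem.List.pyRange 1 (r.length : Int) 1).foldl tiltStep (r, no0)).1

-- ===== PORT B =====
-- rebuild one finished segment: its 'O's first, then its '.'s
def segFlush (seg : List String) : List String :=
  List.replicate (seg.count "O") "O" ++ List.replicate (seg.length - seg.count "O") "."

def bStep (st : List String × List String) (c : String) : List String × List String :=
  if c = "." ∨ c = "O" then (st.1, st.2 ++ [c]) else (st.1 ++ segFlush st.2 ++ [c], [])

def tilt_row_alt (r : List String) : List String :=
  let st := r.foldl bStep ([], [])
  st.1 ++ segFlush st.2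

-- ===== PRECONDITION & SPEC =====
-- Pre_ excludes only the empty row, on which the Python A raises IndexError.
def Pre_tilt_row (r : List String) : Prop := r ≠ []
instance (r : List String) : Decidable (Pre_tilt_row r) := by unfold Pre_tilt_row; infer_instance
def pvWitness_tilt_row : List String := ["O", ".", "#", "O", "."]
def Spec_tilt_row (r : List String) (out : List String) : Prop := out = tilt_row_alt r
instance (r : List String) (out : List String) : Decidable (Spec_tilt_row r out) := by unfold Spec_tilt_row; infer_instance

-- ===== CLAIM (what is proved, stated in full; the proofs are below) =====
def Claim_equal_tilt_row : Prop := ∀ (r : List String), Dom_tilt_row r → Pre_tilt_row r → Spec_tilt_row r (tilt_row r)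

-- ===== LEMMAS AND PROOFS =====

lemma segFlush_length (seg : List String) : (segFlush seg).length = seg.length := by
  have := List.count_le_length (l := seg) (a := "O")
  simp [segFlush]; omega

lemma set_at_len {α : Type} (l : List α) (c x : α) (t : List α) :
    (l ++ c :: t).set l.length x = l ++ x :: t := by
  induction l with
  | nil => simp
  | cons h tl ih => simp [ih]

lemma rep_cons {α : Type} (n : Nat) (a : α) (l : List α) :
    List.replicate n a ++ a :: l = a :: (List.replicate n a ++ l) := by
  induction n with
  | zero => simp
  | succ m ih => simp [List.replicate_succ, ih]

lemma segFlush_dot (seg : List String) :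
    segFlush (seg ++ ["."]) = segFlush seg ++ ["."] := by
  have hc := List.count_le_length (l := seg) (a := "O")
  have h0 : List.count "O" ["."] = 0 := by decide
  rw [segFlush, segFlush, List.count_append, h0]
  simp only [Nat.add_zero, List.length_append, List.length_cons, List.length_nil]
  have h2 : seg.length + (0 + 1) - List.count "O" seg = (seg.length - List.count "O" seg) + 1 := by
    omega
  rw [h2, List.replicate_succ']
  simp

lemma segFlush_O (seg : List String) :
    segFlush (seg ++ ["O"]) = "O" :: segFlush seg := by
  have h1 : List.count "O" ["O"] = 1 := by decide
  rw [segFlush, segFlush, List.count_append, h1]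
  simp only [List.length_append, List.length_cons, List.length_nil]
  have h2 : seg.length + (0 + 1) - (List.count "O" seg + 1) = seg.length - List.count "O" seg := by
    omega
  rw [h2, List.replicate_succ]
  simp

-- the loop invariant: A's remaining fold over indices equals B's fold over the remaining chars,
-- where A's row is out ++ segFlush seg ++ rest and next_open = out.length + count 'O' seg
lemma tilt_key : ∀ (rest out seg : List String),
    ((PySem.List.pyRange ((out.length + seg.length : Nat) : Int)
        ((out.length + seg.length + rest.length : Nat) : Int) 1).foldl tiltStep
      (out ++ segFlush seg ++ rest, ((out.length + seg.count "O" : Nat) : Int))).1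
    = (let st := rest.foldl bStep (out, seg); st.1 ++ segFlush st.2) := by
  intro rest
  induction rest with
  | nil =>
    intro out seg
    rw [PySem.List.pyRange_one_eq_nil (by simp)]
    simp
  | cons c rest' ih =>
    intro out seg
    have hn : ((out.length + seg.length : Nat) : Int) < ((out.length + seg.length + (c :: rest').length : Nat) : Int) := by
      have : out.length + seg.length < out.length + seg.length + (c :: rest').length := by
        simp only [List.length_cons]; omega
      exact_mod_cast this
    rw [PySem.List.pyRange_one_cons hn, List.foldl_cons]
    have hget : PySem.List.pyGet? (out ++ segFlush seg ++ c :: rest')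
        ((out.length + seg.length : Nat) : Int) = some c := by
      rw [show out ++ segFlush seg ++ c :: rest' = (out ++ segFlush seg) ++ c :: rest' by simp,
        show ((out.length + seg.length : Nat) : Int) = ((out ++ segFlush seg).length : Int) by
          simp [segFlush_length]]
      exact PySem.List.pyGet?_append_length _ _ _
    by_cases hdot : c = "."
    · -- '.' : state unchanged
      subst hdot
      rw [show tiltStep (out ++ segFlush seg ++ "." :: rest', ((out.length + seg.count "O" : Nat) : Int))
            ((out.length + seg.length : Nat) : Int)
          = (out ++ segFlush seg ++ "." :: rest', ((out.length + seg.count "O" : Nat) : Int)) by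
        simp only [tiltStep, hget]; simp]
      have ihx := ih out (seg ++ ["."])
      simp only [List.length_append, List.length_cons, List.length_nil, List.count_append,
        segFlush_dot] at ihx
      rw [show List.count "O" ["."] = 0 from by decide] at ihx
      simp only [Nat.add_zero] at ihx
      simp only [List.append_assoc, List.cons_append, List.nil_append] at ihx
      simp only [List.length_cons]
      rw [show out.length + seg.length + (rest'.length + 1) = out.length + (seg.length + (0 + 1)) + rest'.length from by omega,
        show (((out.length + seg.length : Nat) : Int) + 1) = ((out.length + (seg.length + (0 + 1)) : Nat) : Int) from by push_cast; ring]
      simpa [bStep] using ihx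
    · by_cases hO : c = "O"
      · -- 'O' : move the rock back to next_open
        subst hO
        have hrow' : ((out ++ segFlush seg ++ "O" :: rest').set
              ((out.length + seg.length : Nat) : Int).toNat ".").set
              ((out.length + seg.count "O" : Nat) : Int).toNat "O"
            = out ++ segFlush (seg ++ ["O"]) ++ rest' := by
          rw [Int.toNat_natCast, Int.toNat_natCast]
          rw [show out ++ segFlush seg ++ "O" :: rest' = (out ++ segFlush seg) ++ "O" :: rest' by simp,
            show out.length + seg.length = (out ++ segFlush seg).length by simp [segFlush_length],
            set_at_len]
          rw [show (out ++ segFlush seg) ++ "." :: rest'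
              = (out ++ List.replicate (seg.count "O") "O")
                ++ "." :: (List.replicate (seg.length - seg.count "O") "." ++ rest') by
            simp [segFlush, rep_cons]]
          rw [show out.length + seg.count "O" = (out ++ List.replicate (seg.count "O") "O").length by simp,
            set_at_len, segFlush_O]
          simp [segFlush, rep_cons]
        rw [show tiltStep (out ++ segFlush seg ++ "O" :: rest', ((out.length + seg.count "O" : Nat) : Int))
              ((out.length + seg.length : Nat) : Int)
            = (out ++ segFlush (seg ++ ["O"]) ++ rest', ((out.length + seg.count "O" : Nat) : Int) + 1) by
          simp only [tiltStep, hget, Option.getD_some, String.reduceEq, reduceIte]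
          rw [hrow']]
        have ihx := ih out (seg ++ ["O"])
        simp only [List.length_append, List.length_cons, List.length_nil, List.count_append] at ihx
        rw [show List.count "O" ["O"] = 1 from by decide] at ihx
        simp only [List.length_cons]
        rw [show out.length + seg.length + (rest'.length + 1) = out.length + (seg.length + (0 + 1)) + rest'.length from by omega,
          show (((out.length + seg.length : Nat) : Int) + 1) = ((out.length + (seg.length + (0 + 1)) : Nat) : Int) from by push_cast; ring,
          show (((out.length + seg.count "O" : Nat) : Int) + 1) = ((out.length + (seg.count "O" + 1) : Nat) : Int) from by push_cast; ring]
        simpa [bStep] using ihx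
      · -- wall: next_open jumps to i + 1, B flushes the segment
        rw [show tiltStep (out ++ segFlush seg ++ c :: rest', ((out.length + seg.count "O" : Nat) : Int))
              ((out.length + seg.length : Nat) : Int)
            = (out ++ segFlush seg ++ c :: rest', ((out.length + seg.length : Nat) : Int) + 1) by
          simp only [tiltStep, hget, Option.getD_some]
          simp [hdot, hO]]
        have ihx := ih (out ++ segFlush seg ++ [c]) []
        simp only [List.length_append, List.length_cons, List.length_nil, List.count_nil,
          segFlush_length, Nat.add_zero] at ihx
        rw [show segFlush [] = [] from by decide] at ihx
        simp only [List.append_nil, List.append_assoc, List.cons_append, List.nil_append] at ihx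
        simp only [List.length_cons]
        rw [show out.length + seg.length + (rest'.length + 1) = out.length + seg.length + 1 + rest'.length from by omega,
          show (((out.length + seg.length : Nat) : Int) + 1) = ((out.length + seg.length + 1 : Nat) : Int) from by push_cast; ring]
        simpa [bStep, hdot, hO] using ihx

theorem tilt_main (c0 : String) (rest : List String) :
    tilt_row (c0 :: rest) = tilt_row_alt (c0 :: rest) := by
  by_cases hdot : c0 = "."
  · subst hdot
    have k := tilt_key rest [] ["."]
    rw [show segFlush ["."] = ["."] from by decide] at k
    norm_num at k
    simp only [tilt_row, tilt_row_alt, bStep, List.foldl_cons, List.length_cons]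
    norm_num
    simpa [bStep, add_comm] using k
  · by_cases hO : c0 = "O"
    · subst hO
      have k := tilt_key rest [] ["O"]
      rw [show segFlush ["O"] = ["O"] from by decide] at k
      norm_num at k
      simp only [tilt_row, tilt_row_alt, bStep, List.foldl_cons, List.length_cons]
      norm_num
      simpa [bStep, add_comm] using k
    · have k := tilt_key rest [c0] []
      rw [show segFlush [] = [] from by decide] at k
      norm_num at k
      simp only [tilt_row, tilt_row_alt, bStep, List.foldl_cons, List.length_cons]
      norm_num [hdot, hO]
      simpa [bStep, hdot, hO, add_comm, show segFlush ([]:List String) = [] from by decide] using k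

-- ===== VERDICT (by name: the statement is the Claim_ definition above) =====
theorem tilt_row_spec : Claim_equal_tilt_row := by
  intro r _ hne
  unfold Spec_tilt_row
  match r with
  | [] => exact absurd rfl hne
  | c0 :: rest => exact tilt_main c0 rest
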